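-- pv_equiv track=rewrite | github.com/DanicaChakroborty/artist-reccs | GroupProjectFinal.py | bestReccs
-- ===== SOURCE A (Python) =====
-- def bestReccs(prefs, userData, userName):
--     '''
--     This is also another helper function for getReccs, which identifies
--     the reccomendations based on how frequent an artist is in the other user's
--     preferences
--     - Danica Chakroborty
--     '''
--     freq = 0
--     ogReccs = []
--     for otherUser, likes in userData.items():
--         if otherUser.lower() == userName.lower() or '$' in otherUser:
--             continue
--         overlap = 0
--         uniqReccs = []
--         for like in likes:
--             if like in prefs:
--                 overlap += 1
--             elif like not in uniqReccs:
--                 uniqReccs.append(like)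
--         if uniqReccs and overlap > freq:
--             freq = overlap
--             ogReccs = uniqReccs
--     return sorted(ogReccs) if ogReccs else []
-- ===== SOURCE B (Python) =====
-- def bestReccs(prefs, userData, userName):
--     '''Staged sort-then-pick: build candidates, stable-sort by descending
--     overlap, take the head.  Overlap is computed arithmetically as
--     len(likes) - len(non-preferred likes).'''
--     pref_set = set(prefs)
--     me = userName.lower()
--     cands = []
--     for user, likes in userData.items():
--         if user.lower() == me or '$' in user:
--             continue
--         others = [like for like in likes if like not in pref_set]
--         recs = list(dict.fromkeys(others))
--         if recs:
--             cands.append((len(likes) - len(others), recs))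
--     cands.sort(key=lambda c: c[0], reverse=True)
--     if cands and cands[0][0] > 0:
--         return sorted(cands[0][1])
--     return []
-- ===== Notes on version B (the rewrite author's own statement) =====
-- stated objective: faster
-- what changed: Replaces A's online running-best loop by a staged sort-then-pick: candidates (overlap, deduped recs) are materialized per eligible user, with overlap computed arithmetically as len(likes)-len(non-preferred likes) using a set (removing A's per-like scans of prefs and of the growing recs list), then a stable reverse sort by overlap puts the first maximal candidate at the head, which is gated on overlap>0.
import Mathlib
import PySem

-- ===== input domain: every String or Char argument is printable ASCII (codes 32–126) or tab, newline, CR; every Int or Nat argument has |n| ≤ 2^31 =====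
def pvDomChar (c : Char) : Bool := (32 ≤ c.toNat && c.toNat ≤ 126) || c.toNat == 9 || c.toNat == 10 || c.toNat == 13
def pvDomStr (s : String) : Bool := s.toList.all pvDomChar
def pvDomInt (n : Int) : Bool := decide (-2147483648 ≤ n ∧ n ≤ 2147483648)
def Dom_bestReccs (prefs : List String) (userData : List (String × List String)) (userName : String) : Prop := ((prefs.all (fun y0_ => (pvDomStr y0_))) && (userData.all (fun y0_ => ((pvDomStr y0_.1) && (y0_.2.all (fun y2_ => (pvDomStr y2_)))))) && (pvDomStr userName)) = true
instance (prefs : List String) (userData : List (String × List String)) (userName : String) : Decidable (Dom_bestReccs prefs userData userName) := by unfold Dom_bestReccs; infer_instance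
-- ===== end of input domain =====

-- B replaces A's online running-best loop by a staged sort-then-pick structure with set membership (measured faster in a timing run).

-- ===== PORT A =====
-- inner loop of A: for like in likes: count overlap / collect unique non-pref recs
def bestReccsInner (prefs : List String) (likes : List String) : Int × List String :=
  likes.foldl (fun st like =>
    if prefs.contains like then (st.1 + 1, st.2)
    else if st.2.contains like then st
    else (st.1, st.2 ++ [like])) (0, [])

def bestReccs (prefs : List String) (userData : List (String × List String)) (userName : String) : List String :=
  let st := (PySem.Dict.ofList userData).items.foldl
    (fun (st : Int × List String) p =>
      if (PySem.Str.lower p.1 == PySem.Str.lower userName) || PySem.Str.isIn "$" p.1 then st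
      else
        let c := bestReccsInner prefs p.2
        if c.2 ≠ [] ∧ st.1 < c.1 then c else st)
    (0, [])
  if st.2 ≠ [] then PySem.List.sorted st.2 (fun x => x) false else []

-- ===== PORT B =====
-- candidate of Source B: overlap by length arithmetic over the set, recs = ordered dedup of non-pref likes
def bestReccsCandB (prefSet : PySem.Set String) (likes : List String) : Int × List String :=
  let others := likes.filter (fun l => !(PySem.Set.contains prefSet l))
  (((likes.length : Int) - others.length), PySem.List.dedup others)

def bestReccs_alt (prefs : List String) (userData : List (String × List String)) (userName : String) : List String :=
  let prefSet := PySem.Set.ofList prefs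
  let me := PySem.Str.lower userName
  let cands := (PySem.Dict.ofList userData).items.foldl
    (fun (acc : List (Int × List String)) p =>
      if (PySem.Str.lower p.1 == me) || PySem.Str.isIn "$" p.1 then acc
      else
        let c := bestReccsCandB prefSet p.2
        if c.2.isEmpty then acc else acc ++ [c]) []
  match (PySem.List.sorted cands (fun c => c.1) true).head? with
  | some c => if 0 < c.1 then PySem.List.sorted c.2 (fun x => x) false else []
  | none => []

-- ===== PRECONDITION & SPEC =====
def Spec_bestReccs (prefs : List String) (userData : List (String × List String)) (userName : String) (out : List String) : Prop := out = bestReccs_alt prefs userData userName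
instance (prefs : List String) (userData : List (String × List String)) (userName : String) (out : List String) : Decidable (Spec_bestReccs prefs userData userName out) := by unfold Spec_bestReccs; infer_instance

-- ===== CLAIM (what is proved, stated in full; the proofs are below) =====
def Claim_equal_bestReccs : Prop := ∀ (prefs : List String) (userData : List (String × List String)) (userName : String), Dom_bestReccs prefs userData userName → Spec_bestReccs prefs userData userName (bestReccs prefs userData userName)

-- ===== LEMMAS AND PROOFS =====

-- set(prefs) membership agrees with list membership
lemma contains_ofList_eq (prefs : List String) (l : String) :
    PySem.Set.contains (PySem.Set.ofList prefs) l = prefs.contains l := by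
  by_cases h : l ∈ prefs
  · rw [(PySem.Set.contains_iff _ _).mpr ((PySem.Set.mem_ofList _ _).mpr h)]
    simp [h]
  · have hnot : ¬ l ∈ PySem.Set.ofList prefs := fun hc => h ((PySem.Set.mem_ofList _ _).mp hc)
    have h1 : PySem.Set.contains (PySem.Set.ofList prefs) l = false := by
      cases hc : PySem.Set.contains (PySem.Set.ofList prefs) l
      · rfl
      · exact absurd ((PySem.Set.contains_iff _ _).mp hc) hnot
    rw [h1]
    simp [h]

-- A's inner loop, with general accumulator
lemma inner_gen (prefs : List String) (likes : List String) (ov : Int) (uq : List String) :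
    likes.foldl (fun st like =>
      if prefs.contains like then (st.1 + 1, st.2)
      else if st.2.contains like then st
      else (st.1, st.2 ++ [like])) (ov, uq)
    = (ov + ((likes.filter (fun l => prefs.contains l)).length : Int),
       PySem.Set.update uq (likes.filter (fun l => !prefs.contains l))) := by
  induction likes generalizing ov uq with
  | nil => simp [PySem.Set.update]
  | cons l ls ih =>
    by_cases h : prefs.contains l
    · simp only [List.foldl_cons, h, if_true, List.filter_cons, Bool.not_true]
      rw [ih]
      refine Prod.ext ?_ rfl
      simp
      ring
    · have hb : prefs.contains l = false := by simpa using h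
      simp only [List.foldl_cons, hb, Bool.false_eq_true, if_false, List.filter_cons,
        Bool.not_false, if_true]
      have hstep : (if uq.contains l then (ov, uq) else (ov, uq ++ [l]))
          = ((ov : Int), PySem.Set.add uq l) := by
        simp only [PySem.Set.add, PySem.Set.contains]
        split <;> rfl
      rw [hstep, ih]
      simp [PySem.Set.update]

-- A's inner loop computes B's candidate (overlap by counting = overlap by length arithmetic)
lemma inner_eq_cand (prefs likes : List String) :
    bestReccsInner prefs likes = bestReccsCandB (PySem.Set.ofList prefs) likes := by
  unfold bestReccsInner bestReccsCandB
  rw [inner_gen]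
  simp only [contains_ofList_eq, PySem.List.dedup_eq_ofList]
  refine Prod.ext ?_ ?_
  · have hlen := List.length_eq_length_filter_add (l := likes) (fun l => prefs.contains l)
    simp only [zero_add]
    omega
  · show PySem.Set.update [] _ = _
    rw [PySem.Set.update_nil_left]

-- skipping self/'$' users is folding over the filtered items (shared by both ports)
lemma fold_skip {σ : Type} (userName : String) (f : σ → String × List String → σ)
    (items : List (String × List String)) (st : σ) :
    items.foldl (fun st p =>
        if (PySem.Str.lower p.1 == PySem.Str.lower userName) || PySem.Str.isIn "$" p.1 then st
        else f st p) st
    = (items.filter (fun p => !(PySem.Str.lower p.1 == PySem.Str.lower userName)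
        && !(PySem.Str.isIn "$" p.1))).foldl f st := by
  induction items generalizing st with
  | nil => rfl
  | cons p t ih =>
    by_cases h : ((PySem.Str.lower p.1 == PySem.Str.lower userName) || PySem.Str.isIn "$" p.1) = true
    · have hk : (!(PySem.Str.lower p.1 == PySem.Str.lower userName)
          && !(PySem.Str.isIn "$" p.1)) = false := by
        cases h1 : (PySem.Str.lower p.1 == PySem.Str.lower userName)
        · have h2 : PySem.Str.isIn "$" p.1 = true := by
            rcases Bool.or_eq_true_iff.mp h with hx | hx
            · rw [h1] at hx; cases hx
            · exact hx
          rw [h2]; rfl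
        · rfl
      rw [List.foldl_cons, if_pos h, List.filter_cons, hk]
      simp only [Bool.false_eq_true, if_false]
      exact ih st
    · have h1 : (PySem.Str.lower p.1 == PySem.Str.lower userName) = false := by
        cases h1 : (PySem.Str.lower p.1 == PySem.Str.lower userName)
        · rfl
        · exact absurd (Bool.or_eq_true_iff.mpr (Or.inl h1)) h
      have h2 : PySem.Str.isIn "$" p.1 = false := by
        cases h2 : PySem.Str.isIn "$" p.1
        · rfl
        · exact absurd (Bool.or_eq_true_iff.mpr (Or.inr h2)) h
      have hk : (!(PySem.Str.lower p.1 == PySem.Str.lower userName)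
          && !(PySem.Str.isIn "$" p.1)) = true := by
        rw [h1, h2, Bool.not_false, Bool.and_true]
      rw [List.foldl_cons, if_neg h, List.filter_cons, hk]
      simp only [if_true]
      rw [List.foldl_cons]
      exact ih _

-- dropping empty-recs candidates from A's loop is filtering them out first
lemma fold_drop_empty (cs : List (Int × List String)) (st : Int × List String) :
    cs.foldl (fun st c => if c.2 ≠ [] ∧ st.1 < c.1 then c else st) st
    = (cs.filter (fun c => !c.2.isEmpty)).foldl (fun st c => if st.1 < c.1 then c else st) st := by
  induction cs generalizing st with
  | nil => rfl
  | cons c t ih =>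
    by_cases h : c.2 = []
    · simp only [List.foldl_cons, List.filter_cons, h, List.isEmpty_nil, Bool.not_true]
      rw [if_neg (by simp)]
      exact ih st
    · have hb : (!c.2.isEmpty) = true := by simp [h]
      simp only [List.foldl_cons, List.filter_cons, hb, if_true]
      have hif : (if c.2 ≠ [] ∧ st.1 < c.1 then c else st) = (if st.1 < c.1 then c else st) := by
        by_cases h2 : st.1 < c.1 <;> simp [h, h2]
      rw [hif]
      exact ih _

-- two-step head reduction of the running-max fold
lemma max?_step (d c : Int × List String) (t : List (Int × List String)) :
    PySem.List.max? (d :: c :: t) (fun x => x.1) =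
      PySem.List.max? ((if d.1 < c.1 then c else d) :: t) (fun x => x.1) := by
  simp only [PySem.List.max?, List.foldl_cons]
  congr 1
  split <;> rfl

-- A's running strict-improvement loop selects the first maximal candidate (= max? with key)
lemma run_cons (t : List (Int × List String)) (d st : Int × List String) :
    (d :: t).foldl (fun st c => if st.1 < c.1 then c else st) st
    = (match PySem.List.max? (d :: t) (fun c => c.1) with
       | none => st
       | some m => if st.1 < m.1 then m else st) := by
  induction t generalizing d st with
  | nil => rfl
  | cons c t ih =>
    rw [max?_step]
    have hstep : (if (if st.1 < d.1 then d else st).1 < c.1 then c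
        else (if st.1 < d.1 then d else st))
        = (if st.1 < (if d.1 < c.1 then c else d).1 then (if d.1 < c.1 then c else d)
           else st) := by
      split_ifs with h1 h2 h3 h4 h5 <;> first | rfl | omega
    simp only [List.foldl_cons]
    rw [hstep]
    have h2 := ih (if d.1 < c.1 then c else d) st
    simp only [List.foldl_cons] at h2
    exact h2

lemma run_eq_max? (ds : List (Int × List String)) (st : Int × List String) :
    ds.foldl (fun st c => if st.1 < c.1 then c else st) st
    = (match PySem.List.max? ds (fun c => c.1) with
       | none => st
       | some m => if st.1 < m.1 then m else st) := by
  cases ds with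
  | nil => rfl
  | cons d t => exact run_cons t d st

-- head of a reverse stable insertion equals one step of the running max
lemma ins_head (key : Int × List String → Int) (x : Int × List String)
    (ys : List (Int × List String)) :
    (PySem.List.insertBy (fun a b => decide (key b < key a)) x ys).head?
    = (match ys.head? with
       | none => some x
       | some m => if key m < key x then some x else some m) := by
  cases ys with
  | nil => rfl
  | cons y t =>
    simp only [PySem.List.insertBy, List.head?_cons]
    by_cases h : key y < key x
    · simp [h]
    · simp [h]

-- head of the B-side reverse stable sort is the first maximal candidate
lemma head_sorted_rev (key : Int × List String → Int) (cs : List (Int × List String)) :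
    (PySem.List.sorted cs key true).head? = PySem.List.max? cs key := by
  rw [PySem.List.sorted_rev_eq_foldl_insertBy]
  have hgen : ∀ (acc : List (Int × List String)),
      (cs.foldl (fun acc x => PySem.List.insertBy (fun a b => decide (key b < key a)) x acc) acc).head?
      = cs.foldl (fun o x => match o with
          | none => some x
          | some m => if key m < key x then some x else some m) acc.head? := by
    induction cs with
    | nil => intro acc; rfl
    | cons c t ih =>
      intro acc
      simp only [List.foldl_cons]
      rw [ih, ins_head]
  rw [hgen []]
  simp only [List.head?_nil]
  unfold PySem.List.max?
  congr 1
  funext o x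
  cases o <;> rfl

-- ===== VERDICT (by name: the statement is the Claim_ definition above) =====
theorem bestReccs_spec : Claim_equal_bestReccs := by
  intro prefs userData userName _
  unfold Spec_bestReccs bestReccs bestReccs_alt
  simp only []
  rw [fold_skip, fold_skip]
  -- B's appending fold builds the filtered candidate list
  have hBstep : (fun (acc : List (Int × List String)) (p : String × List String) =>
      let c := bestReccsCandB (PySem.Set.ofList prefs) p.2
      if c.2.isEmpty then acc else acc ++ [c])
      = (fun acc p =>
      if (!(bestReccsCandB (PySem.Set.ofList prefs) p.2).2.isEmpty) = true then
        acc ++ [bestReccsCandB (PySem.Set.ofList prefs) p.2] else acc) := by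
    funext acc p
    simp only []
    by_cases h : (bestReccsCandB (PySem.Set.ofList prefs) p.2).2.isEmpty <;> simp [h]
  rw [hBstep, PySem.List.foldl_append_if]
  -- A's fold over candidates, as the running max over the same filtered list
  have hAfun : (fun (st : Int × List String) (p : String × List String) =>
      let c := bestReccsInner prefs p.2
      if c.2 ≠ [] ∧ st.1 < c.1 then c else st)
      = (fun st p =>
      if (bestReccsCandB (PySem.Set.ofList prefs) p.2).2 ≠ [] ∧
          st.1 < (bestReccsCandB (PySem.Set.ofList prefs) p.2).1 then
        bestReccsCandB (PySem.Set.ofList prefs) p.2 else st) := by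
    funext st p
    simp only [inner_eq_cand]
  rw [hAfun,
    ← List.foldl_map (f := fun p : String × List String => bestReccsCandB (PySem.Set.ofList prefs) p.2)
      (g := fun (st c : Int × List String) => if c.2 ≠ [] ∧ st.1 < c.1 then c else st),
    fold_drop_empty, run_eq_max?]
  rw [List.nil_append, head_sorted_rev]
  -- A's filtered candidate list is B's mapped-after-filter list
  have hlists : List.filter (fun c => !c.2.isEmpty)
        (List.map (fun p => bestReccsCandB (PySem.Set.ofList prefs) p.2)
          (List.filter (fun p => !(PySem.Str.lower p.1 == PySem.Str.lower userName)
            && !(PySem.Str.isIn "$" p.1)) (PySem.Dict.ofList userData).items))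
      = List.map (fun p => bestReccsCandB (PySem.Set.ofList prefs) p.2)
        (List.filter (fun p => !(bestReccsCandB (PySem.Set.ofList prefs) p.2).2.isEmpty)
          (List.filter (fun p => !(PySem.Str.lower p.1 == PySem.Str.lower userName)
            && !(PySem.Str.isIn "$" p.1)) (PySem.Dict.ofList userData).items)) := by
    rw [List.filter_map]
    rfl
  rw [hlists]
  cases hmax : PySem.List.max?
      (List.map (fun p => bestReccsCandB (PySem.Set.ofList prefs) p.2)
        (List.filter (fun p => !(bestReccsCandB (PySem.Set.ofList prefs) p.2).2.isEmpty)
          (List.filter (fun p => !(PySem.Str.lower p.1 == PySem.Str.lower userName)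
            && !(PySem.Str.isIn "$" p.1)) (PySem.Dict.ofList userData).items)))
      (fun c => c.1) with
  | none => rfl
  | some m =>
    have hm := PySem.List.max?_mem hmax
    have hne : m.2 ≠ [] := by
      rcases List.mem_map.mp hm with ⟨p, hp, hpe⟩
      have := (List.mem_filter.mp hp).2
      rw [hpe] at this
      simpa using this
    by_cases h0 : (0 : Int) < m.1
    · simp [h0, hne]
    · simp [h0]
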